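-- pv_equiv track=rewrite | github.com/MauriceCalvert/andante | motifs/subject_gen/cpsat_prototype.py | build_consonant_spans
-- ===== SOURCE A (Python) =====
-- MAJOR_SEMITONES = (0, 2, 4, 5, 7, 9, 11)
--
-- CONSONANT_MOD12 = frozenset({0, 3, 4, 5, 7, 8, 9})
--
-- def degree_to_semitone(
--     degree: int,
--     mode_semitones: tuple[int, ...] = MAJOR_SEMITONES,
-- ) -> int:
--     """Convert signed degree offset to semitone offset."""
--     octave, step = divmod(degree, 7)
--     return octave * 12 + mode_semitones[step]
--
-- def build_consonant_spans(
--     mode_semitones: tuple[int, ...],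
-- ) -> set[tuple[int, int]]:
--     """Return (start_degree_mod7, degree_span) pairs producing consonant intervals."""
--     valid = set()
--     for start in range(7):
--         for span in range(-14, 15):
--             s1 = degree_to_semitone(start, mode_semitones)
--             oct2, step2 = divmod(start + span, 7)
--             s2 = oct2 * 12 + mode_semitones[step2]
--             interval_mod12 = abs(s2 - s1) % 12
--             if interval_mod12 in CONSONANT_MOD12:
--                 valid.add((start, span))
--     return valid
-- ===== SOURCE B (Python) =====
-- CONSONANT_MOD12 = frozenset({0, 3, 4, 5, 7, 8, 9})
--
--
-- def build_consonant_spans(mode_semitones):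
--     """Return (start_degree_mod7, degree_span) pairs producing consonant intervals.
--
--     Different algorithm: instead of scanning all 29 spans per start and
--     recomputing octaves/divmod/abs semitone arithmetic for each, first list the
--     consonant degree CLASSES c in 0..6 for each start (octave shifts vanish
--     mod 12, and abs is unnecessary because CONSONANT_MOD12 is closed under
--     negation mod 12), then expand each consonant class arithmetically to the
--     spans in [-14, 14] congruent to it mod 7: c-14, c-7, c, c+7, and 14 when
--     c == 0.
--     """
--     valid = set()
--     for start in range(7):
--         base = mode_semitones[start]
--         classes = [c for c in range(7)
--                    if (mode_semitones[(start + c) % 7] - base) % 12 in CONSONANT_MOD12]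
--         for block in (-14, -7, 0, 7):
--             for c in classes:
--                 valid.add((start, block + c))
--         if 0 in classes:
--             valid.add((start, 14))
--     return valid
-- ===== Notes on version B (the rewrite author's own statement) =====
-- stated objective: alternative
-- what changed: B drops A's per-(start,span) scan with divmod/octave/abs arithmetic: it first lists, per start, the consonant degree classes c in 0..6 (octaves vanish mod 12 and CONSONANT_MOD12 is negation-symmetric mod 12), then expands each consonant class arithmetically to its spans c-14, c-7, c, c+7 (and 14 for c=0) instead of testing all 29 spans.
import Mathlib
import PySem

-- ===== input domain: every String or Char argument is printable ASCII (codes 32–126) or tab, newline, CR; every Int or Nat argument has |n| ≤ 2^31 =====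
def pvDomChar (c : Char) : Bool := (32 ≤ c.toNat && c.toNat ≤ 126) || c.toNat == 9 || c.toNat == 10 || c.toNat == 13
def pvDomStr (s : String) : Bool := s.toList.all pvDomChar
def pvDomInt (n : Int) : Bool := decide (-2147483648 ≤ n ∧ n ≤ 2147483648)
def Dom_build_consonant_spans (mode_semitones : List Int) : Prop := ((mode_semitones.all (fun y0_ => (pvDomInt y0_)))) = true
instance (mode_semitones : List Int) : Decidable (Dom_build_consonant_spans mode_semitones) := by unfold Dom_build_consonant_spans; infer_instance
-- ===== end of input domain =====

-- B replaces A's 29-span scan (with per-pair divmod/octave/abs arithmetic) by listing the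
-- consonant degree classes per start and expanding each class arithmetically to its spans
-- in [-14,14] (objective: alternative).

-- ===== PORT A =====
def CONSONANT_MOD12 : PySem.Set Int := PySem.Set.ofList [0, 3, 4, 5, 7, 8, 9]

-- divmod(degree, 7) ported as floordiv/mod (exact: the divisor 7 is a nonzero literal)
def degree_to_semitone (degree : Int) (mode_semitones : List Int) : Int :=
  let octave := PySem.Int.floordiv degree 7
  let step := PySem.Int.mod degree 7
  octave * 12 + PySem.List.pyGetD mode_semitones step 0

def build_consonant_spans (mode_semitones : List Int) : List (Int × Int) :=
  (PySem.List.pyRange 0 7 1).foldl (fun valid start =>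
    (PySem.List.pyRange (-14) 15 1).foldl (fun valid span =>
      let s1 := degree_to_semitone start mode_semitones
      let oct2 := PySem.Int.floordiv (start + span) 7
      let step2 := PySem.Int.mod (start + span) 7
      let s2 := oct2 * 12 + PySem.List.pyGetD mode_semitones step2 0
      let interval_mod12 := PySem.Int.mod |s2 - s1| 12   -- abs(int) is exactly Int abs
      if interval_mod12 ∈ CONSONANT_MOD12 then PySem.Set.add valid (start, span) else valid)
      valid)
    PySem.Set.empty

-- ===== PORT B =====
def build_consonant_spans_alt (mode_semitones : List Int) : List (Int × Int) :=
  (PySem.List.pyRange 0 7 1).foldl (fun valid start =>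
    let base := PySem.List.pyGetD mode_semitones start 0
    let classes := (PySem.List.pyRange 0 7 1).filter (fun c =>
      decide (PySem.Int.mod (PySem.List.pyGetD mode_semitones (PySem.Int.mod (start + c) 7) 0 - base) 12
        ∈ CONSONANT_MOD12))
    let valid2 := [(-14 : Int), -7, 0, 7].foldl (fun v block =>
      classes.foldl (fun v c => PySem.Set.add v (start, block + c)) v) valid
    if (0 : Int) ∈ classes then PySem.Set.add valid2 (start, 14) else valid2)
    PySem.Set.empty

-- ===== PRECONDITION & SPEC =====
-- A indexes mode_semitones at every degree class 0..6, so Python raises IndexError on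
-- lists shorter than 7; Pre_ excludes exactly those (B raises there too).
def Pre_build_consonant_spans (mode_semitones : List Int) : Prop :=
  7 ≤ mode_semitones.length
instance (mode_semitones : List Int) : Decidable (Pre_build_consonant_spans mode_semitones) := by
  unfold Pre_build_consonant_spans; infer_instance

def pvWitness_build_consonant_spans : List Int := [0, 2, 4, 5, 7, 9, 11]

def Spec_build_consonant_spans (mode_semitones : List Int) (out : List (Int × Int)) : Prop :=
  out = build_consonant_spans_alt mode_semitones
instance (mode_semitones : List Int) (out : List (Int × Int)) :
    Decidable (Spec_build_consonant_spans mode_semitones out) := by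
  unfold Spec_build_consonant_spans; infer_instance

-- ===== CLAIM (what is proved, stated in full; the proofs are below) =====
def Claim_equal_build_consonant_spans : Prop :=
  ∀ (mode_semitones : List Int), Dom_build_consonant_spans mode_semitones →
    Pre_build_consonant_spans mode_semitones →
    Spec_build_consonant_spans mode_semitones (build_consonant_spans mode_semitones)

-- ===== LEMMAS AND PROOFS =====

-- The consonant residue set is symmetric under negation mod 12 and octaves vanish mod 12:
-- |o*12 + x| and x have consonance-equivalent residues.
lemma consKey (o x : Int) :
    (PySem.Int.mod |o * 12 + x| 12 ∈ CONSONANT_MOD12 ↔ PySem.Int.mod x 12 ∈ CONSONANT_MOD12) := by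
  rw [PySem.Int.mod_eq_emod_of_pos (by norm_num), PySem.Int.mod_eq_emod_of_pos (by norm_num)]
  simp only [CONSONANT_MOD12, PySem.Set.mem_ofList, List.mem_cons, List.not_mem_nil, or_false]
  rcases abs_cases (o * 12 + x) with ⟨h1, _⟩ | ⟨h1, _⟩ <;> rw [h1] <;> omega

-- spans congruent mod 7 hit the same degree class
lemma mod7_shift (x a b : Int) (h : (7 : Int) ∣ (a - b)) :
    PySem.Int.mod (x + a) 7 = PySem.Int.mod (x + b) 7 := by
  rw [PySem.Int.mod_eq_emod_of_pos (by norm_num), PySem.Int.mod_eq_emod_of_pos (by norm_num)]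
  obtain ⟨k, hk⟩ := h
  omega

-- A's conditional scan over one whole-octave block of spans equals B's unconditional
-- expansion of the filtered class list shifted by that block.
lemma block_eq (m : List Int) (start block : Int) (hb : (7 : Int) ∣ block)
    (v : List (Int × Int)) :
    ((PySem.List.pyRange 0 7 1).map (fun c => block + c)).foldl
      (fun v span =>
        if PySem.Int.mod (PySem.List.pyGetD m (PySem.Int.mod (start + span) 7) 0 -
            PySem.List.pyGetD m start 0) 12 ∈ CONSONANT_MOD12
        then PySem.Set.add v (start, span) else v) v
    = ((PySem.List.pyRange 0 7 1).filter (fun c =>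
        decide (PySem.Int.mod (PySem.List.pyGetD m (PySem.Int.mod (start + c) 7) 0 -
          PySem.List.pyGetD m start 0) 12 ∈ CONSONANT_MOD12))).foldl
        (fun v c => PySem.Set.add v (start, block + c)) v := by
  rw [List.foldl_map, ← PySem.List.foldl_ite_eq_foldl_filter]
  apply PySem.List.foldl_congr_mem
  intro acc c _
  rw [mod7_shift start (block + c) c (by simpa using hb)]

-- ===== VERDICT (by name: the statement is the Claim_ definition above) =====
theorem build_consonant_spans_spec : Claim_equal_build_consonant_spans := by
  intro m _dom _pre
  unfold Spec_build_consonant_spans build_consonant_spans build_consonant_spans_alt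
  apply PySem.List.foldl_congr_mem
  intro acc start hstart
  obtain ⟨hs0, hs7⟩ := (PySem.List.mem_pyRange_one).1 hstart
  dsimp only
  refine Eq.trans (b := List.foldl (fun v span =>
      if PySem.Int.mod (PySem.List.pyGetD m (PySem.Int.mod (start + span) 7) 0 -
          PySem.List.pyGetD m start 0) 12 ∈ CONSONANT_MOD12
      then PySem.Set.add v (start, span) else v) acc (PySem.List.pyRange (-14) 15 1)) ?_ ?_
  · -- drop divmod/octave/abs from A's test, leaving a condition on the degree class only
    apply PySem.List.foldl_congr_mem
    intro acc2 span _hspan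
    simp only [degree_to_semitone]
    refine if_congr ?_ rfl rfl
    have e1 : PySem.Int.floordiv start 7 = 0 := by
      rw [PySem.Int.floordiv_eq_ediv_of_pos (by norm_num : (0:Int) < 7)]; omega
    have e2 : PySem.Int.mod start 7 = start := by
      rw [PySem.Int.mod_eq_emod_of_pos (by norm_num : (0:Int) < 7)]; omega
    rw [e1, e2]
    have h3 : PySem.Int.floordiv (start + span) 7 * 12 +
        PySem.List.pyGetD m (PySem.Int.mod (start + span) 7) 0 -
        (0 * 12 + PySem.List.pyGetD m start 0) =
        PySem.Int.floordiv (start + span) 7 * 12 +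
          (PySem.List.pyGetD m (PySem.Int.mod (start + span) 7) 0 -
            PySem.List.pyGetD m start 0) := by ring
    rw [h3]
    exact consKey _ _
  · -- split the span range into four whole-octave blocks plus the lone span 14
    have hsplit : PySem.List.pyRange (-14) 15 1 =
        ((PySem.List.pyRange 0 7 1).map (fun c => (-14 : Int) + c)) ++
        ((PySem.List.pyRange 0 7 1).map (fun c => (-7 : Int) + c)) ++
        ((PySem.List.pyRange 0 7 1).map (fun c => (0 : Int) + c)) ++
        ((PySem.List.pyRange 0 7 1).map (fun c => (7 : Int) + c)) ++ [(14 : Int)] := by decide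
    rw [hsplit]
    simp only [List.foldl_append]
    rw [block_eq m start (-14) (by decide), block_eq m start (-7) (by decide),
        block_eq m start 0 (by decide), block_eq m start 7 (by decide)]
    simp only [List.foldl_cons, List.foldl_nil]
    -- (terms already beta-reduced here)
    refine if_congr ?_ rfl rfl
    rw [mod7_shift start 14 0 (by decide)]
    simp [List.mem_filter, PySem.List.mem_pyRange_one]
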